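-- pv_equiv track=rewrite | github.com/AdUhTkJm/cambridge-battlecode | bots/defect/main.py | get_delta_within_range
-- ===== SOURCE A (Python) =====
-- import math
--
-- def get_delta_within_range(r) -> list[tuple[int, int]]:
--   """
--   Get all possible deltas (x, y) such that x^2 + y^2 <= range.
--   """
--   pairs = []
--   limit = int(math.sqrt(r))
--
--   for x in range(-limit, limit + 1):
--     for y in range(-limit, limit + 1):
--       if x * x + y * y <= r:
--         pairs.append((x, y))
--
--   return pairs
-- ===== SOURCE B (Python) =====
-- import math
--
-- def get_delta_within_range(r) -> list[tuple[int, int]]: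
--   """
--   Get all possible deltas (x, y) such that x^2 + y^2 <= range.
--   Computes only the x >= 1 half; the x <= -1 half is its point reflection
--   (x,y) -> (-x,-y), which reverses lexicographic order, so it is the
--   reversed negation of the right half.
--   """
--   limit = math.isqrt(r)
--   right = []
--   for x in range(1, limit + 1):
--     yl = math.isqrt(r - x * x)
--     for y in range(-yl, yl + 1):
--       right.append((x, y))
--   middle = [(0, y) for y in range(-limit, limit + 1)]
--   left = [(-x, -y) for (x, y) in reversed(right)]
--   return left + middle + right
-- ===== Notes on version B (the rewrite author's own statement) =====
-- stated objective: alternative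
-- what changed: Instead of scanning the full (2*limit+1)^2 square and filtering by x*x+y*y<=r, B computes only the x>=1 half with per-column exact bounds yl=isqrt(r-x*x), builds the x=0 column directly, and obtains the x<=-1 half as the reversed point reflection (x,y)->(-x,-y) of the right half; no membership test and half the column computations.
import Mathlib
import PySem

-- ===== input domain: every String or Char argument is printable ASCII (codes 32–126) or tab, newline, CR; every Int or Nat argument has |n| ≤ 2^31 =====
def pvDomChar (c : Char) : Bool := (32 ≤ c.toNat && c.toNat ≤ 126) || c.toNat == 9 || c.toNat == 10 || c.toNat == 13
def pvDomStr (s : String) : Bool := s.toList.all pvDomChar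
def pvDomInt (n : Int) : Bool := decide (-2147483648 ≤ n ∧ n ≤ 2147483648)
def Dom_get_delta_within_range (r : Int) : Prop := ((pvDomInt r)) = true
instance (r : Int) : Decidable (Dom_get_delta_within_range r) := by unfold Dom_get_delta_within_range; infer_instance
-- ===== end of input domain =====

-- B computes only the x ≥ 1 half of the disk (per-column exact bound isqrt(r - x*x)),
-- the x = 0 column directly, and derives the x ≤ -1 half as the reversed point
-- reflection (x,y) → (-x,-y) of the right half; an alternative of similar cost.

-- ===== PORT A =====
-- int(math.sqrt(r)) is ported as ((r.toNat.sqrt : Int)): on Dom (r ≤ 2^31) the double sqrt is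
-- within 2^-37 of the true root while the distance of √r to the nearest wrong integer exceeds
-- 2^-17, so int(math.sqrt(r)) = isqrt(r) exactly there; math.sqrt raises ValueError for r < 0 (Pre_).
def get_delta_within_range (r : Int) : List (Int × Int) :=
  let limit : Int := ((r.toNat.sqrt : Int))
  (PySem.List.pyRange (-limit) (limit + 1) 1).foldl (fun pairs x =>
    (PySem.List.pyRange (-limit) (limit + 1) 1).foldl (fun pairs y =>
      if x * x + y * y ≤ r then pairs ++ [(x, y)] else pairs) pairs) []

-- ===== PORT B =====
-- math.isqrt = Nat.sqrt on nonnegative ints; raises ValueError for r < 0 (outside Pre_).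
def get_delta_within_range_alt (r : Int) : List (Int × Int) :=
  let limit : Int := ((r.toNat.sqrt : Int))
  let right := (PySem.List.pyRange 1 (limit + 1) 1).foldl (fun right x =>
    let yl : Int := (((r - x * x).toNat.sqrt : Int))
    (PySem.List.pyRange (-yl) (yl + 1) 1).foldl (fun right y => right ++ [(x, y)]) right) []
  let middle := (PySem.List.pyRange (-limit) (limit + 1) 1).map (fun y => ((0 : Int), y))
  let left := right.reverse.map (fun p => (-p.1, -p.2))
  left ++ middle ++ right

-- ===== PRECONDITION & SPEC =====
-- math.sqrt (A) and math.isqrt (B) both raise ValueError on negative input.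
def Pre_get_delta_within_range (r : Int) : Prop := 0 ≤ r
instance (r : Int) : Decidable (Pre_get_delta_within_range r) := by unfold Pre_get_delta_within_range; infer_instance
def pvWitness_get_delta_within_range : Int := (5)

def Spec_get_delta_within_range (r : Int) (out : List (Int × Int)) : Prop := out = get_delta_within_range_alt r
instance (r : Int) (out : List (Int × Int)) : Decidable (Spec_get_delta_within_range r out) := by unfold Spec_get_delta_within_range; infer_instance

-- ===== CLAIM (what is proved, stated in full; the proofs are below) =====
def Claim_equal_get_delta_within_range : Prop := ∀ (r : Int), Dom_get_delta_within_range r → Pre_get_delta_within_range r → Spec_get_delta_within_range r (get_delta_within_range r)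

-- ===== LEMMAS AND PROOFS =====

-- y*y ≤ m (with 0 ≤ m) iff |y| ≤ isqrt m
theorem sq_le_iff_abs_le_sqrt (m : Int) (hm : 0 ≤ m) (y : Int) :
    y * y ≤ m ↔ (-((m.toNat.sqrt : Int)) ≤ y ∧ y ≤ ((m.toNat.sqrt : Int))) := by
  have h1 : ((y.natAbs * y.natAbs : ℕ) : Int) = y * y := by
    push_cast
    exact abs_mul_abs_self y
  have h2 : m.toNat.sqrt * m.toNat.sqrt ≤ m.toNat := by
    simpa [sq] using Nat.sqrt_le' m.toNat
  constructor
  · intro h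
    have hle : y.natAbs * y.natAbs ≤ m.toNat := by
      have : ((y.natAbs * y.natAbs : ℕ) : Int) ≤ (m.toNat : Int) := by rw [h1]; omega
      exact_mod_cast this
    have := Nat.le_sqrt.mpr hle
    omega
  · rintro ⟨ha, hb⟩
    have hy : y.natAbs ≤ m.toNat.sqrt := by omega
    have h3 : y.natAbs * y.natAbs ≤ m.toNat := le_trans (Nat.mul_le_mul hy hy) h2
    have : ((y.natAbs * y.natAbs : ℕ) : Int) ≤ ((m.toNat : ℕ) : Int) := by exact_mod_cast h3
    rw [h1] at this
    omega

-- the filtered full range equals the computed contiguous range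
theorem filter_range_eq (r x : Int) (hr : 0 ≤ r)
    (hx : -((r.toNat.sqrt : Int)) ≤ x ∧ x ≤ ((r.toNat.sqrt : Int))) :
    (PySem.List.pyRange (-((r.toNat.sqrt : Int))) (((r.toNat.sqrt : Int)) + 1) 1).filter
      (fun y => decide (x * x + y * y ≤ r))
    = PySem.List.pyRange (-((((r - x * x).toNat.sqrt : Int)))) ((((r - x * x).toNat.sqrt : Int)) + 1) 1 := by
  have hxx : x * x ≤ r := (sq_le_iff_abs_le_sqrt r hr x).mpr hx
  have hm : (0 : Int) ≤ r - x * x := by omega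
  have hc0 : (0 : Int) ≤ (((r - x * x).toNat.sqrt : Int)) := Int.natCast_nonneg _
  have hsq : 0 ≤ x * x := mul_self_nonneg x
  have hnat : (r - x * x).toNat ≤ r.toNat := by omega
  have hcL : (((r - x * x).toNat.sqrt : Int)) ≤ ((r.toNat.sqrt : Int)) :=
    (Nat.cast_le (α := ℤ)).mpr (Nat.sqrt_le_sqrt hnat)
  have hiff : ∀ y : Int, (x * x + y * y ≤ r) ↔
      (-(((r - x * x).toNat.sqrt : Int)) ≤ y ∧ y ≤ (((r - x * x).toNat.sqrt : Int))) := by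
    intro y
    have h := sq_le_iff_abs_le_sqrt (r - x * x) hm y
    constructor
    · intro hle; exact h.mp (by omega)
    · intro hb; have := h.mpr hb; omega
  have hsplit1 : PySem.List.pyRange (-((r.toNat.sqrt : Int))) (((r.toNat.sqrt : Int)) + 1) 1
      = PySem.List.pyRange (-((r.toNat.sqrt : Int))) (-(((r - x * x).toNat.sqrt : Int))) 1
        ++ PySem.List.pyRange (-(((r - x * x).toNat.sqrt : Int))) (((r.toNat.sqrt : Int)) + 1) 1 :=
    PySem.List.pyRange_one_append _ _ _ (by omega) (by omega)
  have hsplit2 : PySem.List.pyRange (-(((r - x * x).toNat.sqrt : Int))) (((r.toNat.sqrt : Int)) + 1) 1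
      = PySem.List.pyRange (-(((r - x * x).toNat.sqrt : Int))) ((((r - x * x).toNat.sqrt : Int)) + 1) 1
        ++ PySem.List.pyRange ((((r - x * x).toNat.sqrt : Int)) + 1) (((r.toNat.sqrt : Int)) + 1) 1 :=
    PySem.List.pyRange_one_append _ _ _ (by omega) (by omega)
  rw [hsplit1, hsplit2, List.filter_append, List.filter_append]
  have hnil1 : (PySem.List.pyRange (-((r.toNat.sqrt : Int))) (-(((r - x * x).toNat.sqrt : Int))) 1).filter
      (fun y => decide (x * x + y * y ≤ r)) = [] := by
    rw [List.filter_eq_nil_iff]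
    intro y hy
    rw [PySem.List.mem_pyRange_one] at hy
    simp only [decide_eq_true_eq]
    rw [hiff y]; omega
  have hnil2 : (PySem.List.pyRange ((((r - x * x).toNat.sqrt : Int)) + 1) (((r.toNat.sqrt : Int)) + 1) 1).filter
      (fun y => decide (x * x + y * y ≤ r)) = [] := by
    rw [List.filter_eq_nil_iff]
    intro y hy
    rw [PySem.List.mem_pyRange_one] at hy
    simp only [decide_eq_true_eq]
    rw [hiff y]; omega
  have hself : (PySem.List.pyRange (-(((r - x * x).toNat.sqrt : Int))) ((((r - x * x).toNat.sqrt : Int)) + 1) 1).filter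
      (fun y => decide (x * x + y * y ≤ r))
      = PySem.List.pyRange (-(((r - x * x).toNat.sqrt : Int))) ((((r - x * x).toNat.sqrt : Int)) + 1) 1 := by
    rw [List.filter_eq_self]
    intro y hy
    rw [PySem.List.mem_pyRange_one] at hy
    simp only [decide_eq_true_eq]
    rw [hiff y]; omega
  rw [hnil1, hnil2, hself, List.append_nil, List.nil_append]

-- a symmetric range is fixed by reverse-then-negate
theorem neg_reverse_range (c : Int) (hc : 0 ≤ c) :
    ((PySem.List.pyRange (-c) (c + 1) 1).reverse).map (fun y => -y)
      = PySem.List.pyRange (-c) (c + 1) 1 := by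
  apply List.ext_getElem
  · simp [PySem.List.length_pyRange_one]
  · intro k h1 h2
    simp only [List.length_map, List.length_reverse, PySem.List.length_pyRange_one] at h1 h2
    simp only [List.getElem_map, List.getElem_reverse,
      PySem.List.length_pyRange_one]
    rw [PySem.List.getElem_pyRange_one, PySem.List.getElem_pyRange_one]
    omega

-- ===== VERDICT (by name: the statement is the Claim_ definition above) =====
theorem get_delta_within_range_spec : Claim_equal_get_delta_within_range := by
  intro r _ hr
  unfold Spec_get_delta_within_range get_delta_within_range get_delta_within_range_alt
  simp only []
  set L : Int := ((r.toNat.sqrt : Int)) with hL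
  have hL0 : 0 ≤ L := Int.natCast_nonneg _
  set f : Int → List (Int × Int) := fun x =>
    (PySem.List.pyRange (-((((r - x * x).toNat.sqrt : Int))))
      ((((r - x * x).toNat.sqrt : Int)) + 1) 1).map (fun y => (x, y)) with hf
  -- A as a flatMap of exact columns
  have hA :
      (PySem.List.pyRange (-L) (L + 1) 1).foldl (fun pairs x =>
        (PySem.List.pyRange (-L) (L + 1) 1).foldl (fun pairs y =>
          if x * x + y * y ≤ r then pairs ++ [(x, y)] else pairs) pairs) []
      = (PySem.List.pyRange (-L) (L + 1) 1).flatMap f := by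
    have h1 :
        (PySem.List.pyRange (-L) (L + 1) 1).foldl (fun pairs x =>
          (PySem.List.pyRange (-L) (L + 1) 1).foldl (fun pairs y =>
            if x * x + y * y ≤ r then pairs ++ [(x, y)] else pairs) pairs) []
        = [] ++ (PySem.List.pyRange (-L) (L + 1) 1).flatMap (fun x =>
            ((PySem.List.pyRange (-L) (L + 1) 1).filter
              (fun y => decide (x * x + y * y ≤ r))).map (fun y => (x, y))) := by
      rw [← PySem.List.foldl_append_eq_flatMap
        (g := fun x => ((PySem.List.pyRange (-L) (L + 1) 1).filter
          (fun y => decide (x * x + y * y ≤ r))).map (fun y => (x, y)))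
        (l := PySem.List.pyRange (-L) (L + 1) 1) (acc := [])]
      apply PySem.List.foldl_congr_mem
      intro pairs x _
      exact PySem.List.foldl_append_ite (p := fun y => x * x + y * y ≤ r) (f := fun y => (x, y)) _ _
    rw [h1, List.nil_append]
    rw [List.flatMap, List.flatMap]
    congr 1
    apply List.map_congr_left
    intro x hxmem
    rw [PySem.List.mem_pyRange_one] at hxmem
    rw [filter_range_eq r x hr ⟨by omega, by omega⟩]
  -- B's right half as a flatMap of exact columns
  have hR :
      (PySem.List.pyRange 1 (L + 1) 1).foldl (fun right x =>
        (PySem.List.pyRange (-(((r - x * x).toNat.sqrt : Int)))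
          ((((r - x * x).toNat.sqrt : Int)) + 1) 1).foldl (fun right y => right ++ [(x, y)]) right) []
      = (PySem.List.pyRange 1 (L + 1) 1).flatMap f := by
    have h1 :
        (PySem.List.pyRange 1 (L + 1) 1).foldl (fun right x =>
          (PySem.List.pyRange (-(((r - x * x).toNat.sqrt : Int)))
            ((((r - x * x).toNat.sqrt : Int)) + 1) 1).foldl (fun right y => right ++ [(x, y)]) right) []
        = [] ++ (PySem.List.pyRange 1 (L + 1) 1).flatMap f := by
      rw [← PySem.List.foldl_append_eq_flatMap (g := f)
        (l := PySem.List.pyRange 1 (L + 1) 1) (acc := [])]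
      apply PySem.List.foldl_congr_mem
      intro pairs x _
      apply PySem.List.foldl_append_singleton_eq_map
    rw [h1, List.nil_append]
  -- split A's outer range at 0 and 1
  have hAsplit : (PySem.List.pyRange (-L) (L + 1) 1).flatMap f
      = (PySem.List.pyRange (-L) 0 1).flatMap f ++ (PySem.List.pyRange 0 1 1).flatMap f
        ++ (PySem.List.pyRange 1 (L + 1) 1).flatMap f := by
    have hsplit : PySem.List.pyRange (-L) (L + 1) 1
        = (PySem.List.pyRange (-L) 0 1 ++ PySem.List.pyRange 0 1 1) ++ PySem.List.pyRange 1 (L + 1) 1 := by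
      rw [← PySem.List.pyRange_one_append (-L) 0 1 (by omega) (by omega)]
      exact PySem.List.pyRange_one_append _ _ _ (by omega) (by omega)
    rw [hsplit, List.flatMap_append, List.flatMap_append]
  -- middle column: x = 0
  have hmid : (PySem.List.pyRange 0 1 1).flatMap f
      = (PySem.List.pyRange (-L) (L + 1) 1).map (fun y => ((0 : Int), y)) := by
    have h01 : PySem.List.pyRange (0:Int) 1 1 = [(0:Int)] := by
      simpa using PySem.List.pyRange_one_singleton (0:Int)
    rw [h01]
    simp only [List.flatMap_cons, List.flatMap_nil, List.append_nil, hf]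
    norm_num [hL]
  -- left half is the reversed reflection of the right half
  have hneg : PySem.List.pyRange (-L) 0 1
      = ((PySem.List.pyRange 1 (L + 1) 1).reverse).map (fun x => -x) := by
    apply List.ext_getElem
    · simp [PySem.List.length_pyRange_one]
    · intro k h1 h2
      simp only [List.length_map, List.length_reverse, PySem.List.length_pyRange_one] at h1 h2
      simp only [List.getElem_map, List.getElem_reverse,
        PySem.List.length_pyRange_one]
      rw [PySem.List.getElem_pyRange_one, PySem.List.getElem_pyRange_one]
      omega
  have hleft : (PySem.List.pyRange (-L) 0 1).flatMap f
      = (((PySem.List.pyRange 1 (L + 1) 1).flatMap f).reverse).map (fun p => (-p.1, -p.2)) := by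
    rw [List.reverse_flatMap, List.map_flatMap, hneg, List.flatMap_map]
    rw [List.flatMap, List.flatMap]
    congr 1
    apply List.map_congr_left
    intro x hxmem
    rw [List.mem_reverse, PySem.List.mem_pyRange_one] at hxmem
    have hxx : (-x) * (-x) = x * x := by ring
    simp only [hf, Function.comp_apply, hxx]
    rw [← List.map_reverse, List.map_map]
    rw [show ((fun p : Int × Int => (-p.1, -p.2)) ∘ fun y => (x, y))
        = (fun y => ((-x : Int), y)) ∘ (fun y : Int => -y) from rfl]
    rw [← List.map_map, neg_reverse_range _ (Int.natCast_nonneg _)]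
  rw [hA, hR, hAsplit, hmid, hleft]
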